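-- pv_equiv track=rewrite | github.com/joberthrogers18/Machine-learning-training-PIBIC | text-to-speech/gtts-ts-google.py | treat_content_file
-- ===== SOURCE A (Python) =====
-- def treat_content_file (content_file):
--
--   list_characters = ["!", ".", "'", "/", "|", "~", "`",
--   "@","#", "£", "$", "%", "^", "&", "*", "(", ")"]
--
--   string_split = []
--
--   for i in list_characters:
--     content_file = content_file.replace(i, " ")
--
--   string_split = content_file.split(" ")
--
--   return string_split
-- ===== SOURCE B (Python) =====
-- def treat_content_file(content_file):
--   delimiters = set("!.'/|~`@#£$%^&*() ")
--   words = []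
--   buf = []
--   for c in content_file:
--     if c in delimiters:
--       words.append(''.join(buf))
--       buf = []
--     else:
--       buf.append(c)
--   words.append(''.join(buf))
--   return words
-- ===== Notes on version B (the rewrite author's own statement) =====
-- stated objective: alternative
-- what changed: Replaces A's 17 sequential full-string replace passes plus a final space-split with a single left-to-right scan that tests each character against a delimiter set and cuts words on the fly; one pass instead of 18, though A's C-level built-ins are faster in CPython.
import Mathlib
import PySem

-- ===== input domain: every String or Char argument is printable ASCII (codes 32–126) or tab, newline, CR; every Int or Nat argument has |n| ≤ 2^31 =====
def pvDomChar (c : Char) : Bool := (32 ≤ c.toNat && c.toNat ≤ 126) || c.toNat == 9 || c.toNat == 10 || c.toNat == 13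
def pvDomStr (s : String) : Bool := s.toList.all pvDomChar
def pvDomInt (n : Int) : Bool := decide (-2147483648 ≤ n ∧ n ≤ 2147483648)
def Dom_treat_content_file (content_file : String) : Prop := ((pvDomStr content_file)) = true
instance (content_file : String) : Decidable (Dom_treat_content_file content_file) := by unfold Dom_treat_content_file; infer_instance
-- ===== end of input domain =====

-- B replaces A's 17 replace passes + split(' ') by one scan with a delimiter set (alternative decomposition, same output).
-- ===== PORT A =====
def treat_content_file (content_file : String) : List String :=
  let list_characters : List String := ["!", ".", "'", "/", "|", "~", "`",
    "@", "#", "£", "$", "%", "^", "&", "*", "(", ")"]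
  let content_file := list_characters.foldl (fun acc i => PySem.Str.replace acc i " ") content_file
  -- content_file.split(" "): sep " " is non-empty, so this is Chars.splitOn (exact)
  (PySem.Chars.splitOn content_file.toList " ".toList).map String.mk

-- ===== PORT B =====
def tcfDelims : PySem.Set Char := PySem.Set.ofList ("!.'/|~`@#£$%^&*() ".toList)

def tcfGo (buf : List Char) : List Char → List String
  | [] => [String.mk buf.reverse]
  | c :: t =>
      if tcfDelims.contains c then String.mk buf.reverse :: tcfGo [] t
      else tcfGo (c :: buf) t

def treat_content_file_alt (content_file : String) : List String :=
  tcfGo [] content_file.toList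

-- ===== PRECONDITION & SPEC =====
def Spec_treat_content_file (content_file : String) (out : List String) : Prop := out = treat_content_file_alt content_file
instance (content_file : String) (out : List String) : Decidable (Spec_treat_content_file content_file out) := by unfold Spec_treat_content_file; infer_instance

-- ===== CLAIM (what is proved, stated in full; the proofs are below) =====
def Claim_equal_treat_content_file : Prop := ∀ (content_file : String), Dom_treat_content_file content_file → Spec_treat_content_file content_file (treat_content_file content_file)

-- ===== LEMMAS AND PROOFS =====

-- proof-side helpers
def pvSP : List Char := "!.'/|~`@#£$%^&*()".toList

def pvScan (cur : List Char) : List Char → List (List Char)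
  | [] => [cur.reverse]
  | c :: t => if c = ' ' then cur.reverse :: pvScan [] t else pvScan (c :: cur) t

theorem pv_replace_go (o n : Char) :
    ∀ (fuel : Nat) (l acc : List Char), l.length ≤ fuel →
    PySem.Chars.replace.go [o] [n] fuel l acc
      = acc.reverse ++ l.map (fun c => if c = o then n else c) := by
  intro fuel
  induction fuel with
  | zero =>
      intro l acc h
      have : l = [] := by cases l <;> simp_all
      subst this; simp [PySem.Chars.replace.go]
  | succ fuel ih =>
      intro l acc h
      cases l with
      | nil => simp [PySem.Chars.replace.go]
      | cons c t =>
          simp only [PySem.Chars.replace.go, List.isPrefixOf]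
          by_cases hc : c = o
          · subst hc
            rw [if_pos (by simp)]
            rw [ih _ _ (by simpa using Nat.le_of_succ_le_succ h)]
            simp
          · rw [if_neg (by simp [beq_iff_eq]; exact fun hh => hc hh.symm)]
            rw [ih _ _ (by simpa using Nat.le_of_succ_le_succ h)]
            simp [hc]

theorem pv_replace_single (o n : Char) (l : List Char) :
    PySem.Chars.replace l [o] [n] = l.map (fun c => if c = o then n else c) := by
  unfold PySem.Chars.replace
  rw [if_neg (by simp)]
  exact pv_replace_go o n l.length l [] (le_refl _)

theorem pv_fold_replace (cs : List Char) :
    ∀ l : List Char,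
    cs.foldl (fun acc o => PySem.Chars.replace acc [o] [' ']) l
      = l.map (fun c => cs.foldl (fun a o => if a = o then ' ' else a) c) := by
  induction cs with
  | nil => intro l; simp
  | cons o cs ih =>
      intro l
      simp only [List.foldl_cons]
      rw [pv_replace_single, ih]
      simp [Function.comp]

theorem pv_char_fold (cs : List Char) (h : ' ' ∉ cs) (c : Char) :
    cs.foldl (fun a o => if a = o then ' ' else a) c = if c ∈ cs then ' ' else c := by
  induction cs generalizing c with
  | nil => simp
  | cons o cs ih =>
      have hsp : ' ' ∉ cs := fun hm => h (List.mem_cons_of_mem _ hm)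
      by_cases hc : c = o
      · subst hc
        simp only [List.foldl_cons, if_true]
        rw [ih hsp ' ', if_neg hsp]
        simp
      · simp only [List.foldl_cons, if_neg hc]
        rw [ih hsp c]
        simp [List.mem_cons, hc]

theorem pv_fold_str_replace (ss : List String) :
    ∀ (s : String),
    ((ss.foldl (fun acc i => PySem.Str.replace acc i " ") s)).toList
      = ss.foldl (fun acc i => PySem.Chars.replace acc i.toList [' ']) s.toList := by
  induction ss with
  | nil => intro s; simp
  | cons i ss ih =>
      intro s
      simp only [List.foldl_cons]
      rw [ih, PySem.Str.toList_replace]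
      rfl

theorem pv_split_go :
    ∀ (fuel : Nat) (l cur : List Char) (acc : List (List Char)), l.length ≤ fuel →
    PySem.Chars.splitOn.go [' '] fuel l cur acc = acc.reverse ++ pvScan cur l := by
  intro fuel
  induction fuel with
  | zero =>
      intro l cur acc h
      have : l = [] := by cases l <;> simp_all
      subst this; simp [PySem.Chars.splitOn.go, pvScan]
  | succ fuel ih =>
      intro l cur acc h
      cases l with
      | nil => simp [PySem.Chars.splitOn.go, pvScan]
      | cons c t =>
          simp only [PySem.Chars.splitOn.go]
          by_cases hc : c = ' '
          · subst hc
            have hp : (([' '] : List Char).isPrefixOf (' ' :: t)) = true := by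
              simp [List.isPrefixOf]
            rw [if_pos hp]
            rw [ih _ _ _ (by simpa using Nat.le_of_succ_le_succ h)]
            simp [pvScan]
          · rw [if_neg (by simp [List.isPrefixOf, beq_iff_eq]; exact fun hh => hc hh.symm)]
            rw [ih _ _ _ (by simpa using Nat.le_of_succ_le_succ h)]
            simp [pvScan, hc]

theorem pv_splitOn_eq_scan (l : List Char) :
    PySem.Chars.splitOn l [' '] = pvScan [] l := by
  unfold PySem.Chars.splitOn
  exact pv_split_go (l.length + 1) l [] [] (Nat.le_succ _)

theorem pv_delims_iff (c : Char) :
    tcfDelims.contains c = true ↔ (c ∈ pvSP ∨ c = ' ') := by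
  have h1 : tcfDelims.contains c = true ↔ c ∈ tcfDelims := List.contains_iff_mem
  rw [h1]
  unfold tcfDelims
  rw [PySem.Set.mem_ofList]
  show c ∈ ("!.'/|~`@#£$%^&*() ".toList) ↔ _
  have he : ("!.'/|~`@#£$%^&*() ".toList) = pvSP ++ [' '] := by decide
  rw [he]
  simp only [List.mem_append, List.mem_singleton]

theorem pv_scan_map (l : List Char) :
    ∀ cur : List Char,
    (pvScan cur (l.map (fun c => if c ∈ pvSP then ' ' else c))).map String.mk
      = tcfGo cur l := by
  induction l with
  | nil => intro cur; simp [pvScan, tcfGo]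
  | cons c t ih =>
      intro cur
      by_cases hd : tcfDelims.contains c = true
      · rcases (pv_delims_iff c).1 hd with hm | hsp
        · simp only [List.map_cons, if_pos hm]
          simp only [pvScan, tcfGo, hd, if_pos]
          simp [ih]
        · subst hsp
          have : (if (' ' : Char) ∈ pvSP then ' ' else ' ') = ' ' := by simp
          simp only [List.map_cons, this]
          simp only [pvScan, tcfGo, hd, if_pos]
          simp [ih]
      · have hm : c ∉ pvSP := fun hm => hd ((pv_delims_iff c).2 (Or.inl hm))
        have hsp : c ≠ ' ' := fun hs => hd ((pv_delims_iff c).2 (Or.inr hs))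
        simp only [List.map_cons, if_neg hm]
        simp only [pvScan, if_neg hsp, tcfGo, hd]
        exact ih (c :: cur)

theorem pv_lists_eq :
    (["!", ".", "'", "/", "|", "~", "`", "@", "#", "£", "$", "%", "^", "&", "*", "(", ")"] :
      List String).map String.toList = pvSP.map (fun c => [c]) := by decide

theorem pv_fold_str_chars (ss : List String) (cs : List Char)
    (h : ss.map String.toList = cs.map (fun c => [c])) :
    ∀ l : List Char,
    ss.foldl (fun acc i => PySem.Chars.replace acc i.toList [' ']) l
      = cs.foldl (fun acc o => PySem.Chars.replace acc [o] [' ']) l := by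
  induction ss generalizing cs with
  | nil =>
      cases cs with
      | nil => intro l; simp
      | cons c cs => simp at h
  | cons i ss ih =>
      cases cs with
      | nil => simp at h
      | cons c cs =>
          simp only [List.map_cons, List.cons.injEq] at h
          intro l
          simp only [List.foldl_cons, h.1]
          exact ih cs h.2 _

-- ===== VERDICT (by name: the statement is the Claim_ definition above) =====
theorem treat_content_file_spec : Claim_equal_treat_content_file := by
  intro cf _
  unfold Spec_treat_content_file treat_content_file treat_content_file_alt
  simp only []
  rw [show " ".toList = [' '] from rfl]
  rw [pv_splitOn_eq_scan, pv_fold_str_replace, pv_fold_str_chars _ pvSP pv_lists_eq,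
      pv_fold_replace]
  have hsp : (' ' : Char) ∉ pvSP := by decide
  have : (fun c => pvSP.foldl (fun a o => if a = o then ' ' else a) c)
       = (fun c => if c ∈ pvSP then ' ' else c) := by
    funext c; exact pv_char_fold pvSP hsp c
  rw [this, pv_scan_map]
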